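-- pv_equiv track=rewrite | github.com/adamelhorri/Mini-inferences-JDM | dataHandling.py | idEntite
-- ===== SOURCE A (Python) =====
-- def idEntite(mot, entite, data):
--     """
--     Récupère les identifiants uniques (id) du mot et de l'entité à partir des données.
--
--     Args:
--         mot (str): Le mot pour lequel on recherche l'identifiant.
--         entite (str): L'entité pour laquelle on recherche l'identifiant.
--         data (dict): Le dictionnaire contenant les données de JeuxDeMots.org.
--
--     Returns:
--         dict: Un dictionnaire contenant les identifiants:
--               - "idEntite": Identifiant de l'entité.
--               - "idMot": Identifiant du mot.
--
--     """
--
--     # Accès au dictionnaire des entités dans les données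
--     jdex = data["e"]
--
--     # Variables pour stocker les identifiants (-1 par défaut si non trouvés)
--     ide = -1
--     idm = -1
--
--     # Parcours du dictionnaire des entités
--     for entity, info in jdex.items():
--         # Nettoyage du nom de l'entité (suppression de quotes)
--         name = info['name'].replace("'", "", 2)
--
--         # Comparaison du nom de l'entité avec l'entité recherchée
--         if name == entite:
--             ide = entity
--
--         # Comparaison du nom de l'entité avec le mot recherché
--         if name == mot:
--             idm = entity
--
--     # Retourne un dictionnaire contenant les identifiants trouvés
--     return {"idEntite": ide, "idMot": idm}
-- ===== SOURCE B (Python) =====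
-- def idEntite(mot, entite, data):
--     # Stage 1: materialize (cleaned name, id) pairs once.
--     pairs = [(info['name'].replace("'", "", 2), entity)
--              for entity, info in data["e"].items()]
--     # Stage 2: for each query, scan backwards and stop at the first hit
--     # (first match from the end == A's last-wins forward scan).
--     def last_id(target):
--         for name, entity in reversed(pairs):
--             if name == target:
--                 return entity
--         return -1
--     return {"idEntite": last_id(entite), "idMot": last_id(mot)}
-- ===== Notes on version B (the rewrite author's own statement) =====
-- stated objective: alternative
-- what changed: B first materializes the cleaned (name,id) pairs, then answers each query by a separate backward early-exit search (first match from the end), replacing A's single forward fold that carries two last-wins accumulators to the end.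
import Mathlib
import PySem

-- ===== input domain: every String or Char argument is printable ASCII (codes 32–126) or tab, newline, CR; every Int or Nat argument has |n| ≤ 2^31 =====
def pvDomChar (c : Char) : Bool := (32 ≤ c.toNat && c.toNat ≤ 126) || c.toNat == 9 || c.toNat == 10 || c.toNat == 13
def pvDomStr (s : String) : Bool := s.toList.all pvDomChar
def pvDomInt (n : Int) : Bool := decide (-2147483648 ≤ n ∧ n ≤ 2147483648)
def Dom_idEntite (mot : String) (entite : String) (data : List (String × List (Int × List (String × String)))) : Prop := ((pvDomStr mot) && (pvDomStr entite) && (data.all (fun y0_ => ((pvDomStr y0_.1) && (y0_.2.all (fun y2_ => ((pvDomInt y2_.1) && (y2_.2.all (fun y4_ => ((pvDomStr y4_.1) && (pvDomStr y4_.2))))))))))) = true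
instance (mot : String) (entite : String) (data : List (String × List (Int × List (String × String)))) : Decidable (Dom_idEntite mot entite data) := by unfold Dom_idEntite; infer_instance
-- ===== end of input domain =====

-- B stages a cleaned (name,id) pair list, then answers each query by a backward early-exit
-- search (first match from the end = A's last-wins forward fold) (objective: alternative).

-- ===== PORT A =====
-- s.replace("'", "", k): remove the first k occurrences of '\'' (exact hand port; PySem.Str.replace has no count)
def pvClean : List Char → Nat → List Char
  | [], _ => []
  | cs, 0 => cs
  | c :: rest, Nat.succ k => if c = '\'' then pvClean rest k else c :: pvClean rest (Nat.succ k)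

-- info['name'].replace("'", "", 2); the "name" lookup is guarded by Pre_ (KeyError otherwise)
def pvName (p : Int × List (String × String)) : String :=
  String.ofList (pvClean (((p.2.find? (fun q => q.1 == "name")).map (·.2)).getD "").toList 2)

def idEntite (mot : String) (entite : String) (data : List (String × List (Int × List (String × String)))) : List (String × Int) :=
  let jdex := ((data.find? (fun p => p.1 == "e")).map (·.2)).getD []
  let r := jdex.foldl
    (fun (s : Int × Int) p =>
      (if pvName p == entite then p.1 else s.1,
       if pvName p == mot then p.1 else s.2))
    (-1, -1)
  [("idEntite", r.1), ("idMot", r.2)]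

-- ===== PORT B =====
def pvLastId (pairs : List (String × Int)) (target : String) : Int :=
  ((pairs.reverse.find? (fun q => q.1 == target)).map (·.2)).getD (-1)

def idEntite_alt (mot : String) (entite : String) (data : List (String × List (Int × List (String × String)))) : List (String × Int) :=
  let jdex := ((data.find? (fun p => p.1 == "e")).map (·.2)).getD []
  let pairs := jdex.map (fun p => (pvName p, p.1))
  [("idEntite", pvLastId pairs entite), ("idMot", pvLastId pairs mot)]

-- ===== PRECONDITION & SPEC =====
-- Pre_ excludes exactly the inputs where Python A raises KeyError: data without key "e",
-- or an entity info dict without key "name".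
def Pre_idEntite (mot : String) (entite : String) (data : List (String × List (Int × List (String × String)))) : Prop :=
  "e" ∈ data.map (·.1) ∧
  ∀ p ∈ ((data.find? (fun p => p.1 == "e")).map (·.2)).getD [], "name" ∈ p.2.map (·.1)
instance (mot : String) (entite : String) (data : List (String × List (Int × List (String × String)))) : Decidable (Pre_idEntite mot entite data) := by unfold Pre_idEntite; infer_instance

def pvWitness_idEntite : String × String × (List (String × List (Int × List (String × String)))) :=
  ("a", "b", [("e", [(1, [("name", "b")]), (2, [("name", "a")])])])

def Spec_idEntite (mot : String) (entite : String) (data : List (String × List (Int × List (String × String)))) (out : List (String × Int)) : Prop := out = idEntite_alt mot entite data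
instance (mot : String) (entite : String) (data : List (String × List (Int × List (String × String)))) (out : List (String × Int)) : Decidable (Spec_idEntite mot entite data out) := by unfold Spec_idEntite; infer_instance

-- ===== CLAIM (what is proved, stated in full; the proofs are below) =====
def Claim_equal_idEntite : Prop := ∀ (mot : String) (entite : String) (data : List (String × List (Int × List (String × String)))), Dom_idEntite mot entite data → Pre_idEntite mot entite data → Spec_idEntite mot entite data (idEntite mot entite data)

-- ===== LEMMAS AND PROOFS =====

-- A's pair-state fold splits into two independent scalar folds.
theorem foldA_split (target₁ target₂ : String)
    (jdex : List (Int × List (String × String))) (a b : Int) :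
    jdex.foldl
      (fun (s : Int × Int) p =>
        (if pvName p == target₁ then p.1 else s.1,
         if pvName p == target₂ then p.1 else s.2)) (a, b)
    = (jdex.foldl (fun x p => if pvName p == target₁ then p.1 else x) a,
       jdex.foldl (fun x p => if pvName p == target₂ then p.1 else x) b) := by
  induction jdex generalizing a b with
  | nil => rfl
  | cons p rest ih => simp only [List.foldl_cons]; exact ih _ _

-- A's last-wins scalar fold is B's first match on the reversed staged pair list.
theorem fold_eq_lastId (jdex : List (Int × List (String × String))) (k : String) (a : Int) :
    jdex.foldl (fun x p => if pvName p == k then p.1 else x) a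
    = (((jdex.map (fun p => (pvName p, p.1))).reverse.find?
          (fun q => q.1 == k)).map (·.2)).getD a := by
  induction jdex generalizing a with
  | nil => rfl
  | cons p rest ih =>
      rw [List.foldl_cons, ih]
      simp only [List.map_cons, List.reverse_cons, List.find?_append]
      cases h : (rest.map (fun p => (pvName p, p.1))).reverse.find? (fun q => q.1 == k) with
      | some v => simp
      | none =>
          simp only [Option.none_or]
          by_cases hk : pvName p == k <;> simp [List.find?, hk]

-- ===== VERDICT (by name: the statement is the Claim_ definition above) =====
theorem idEntite_spec : Claim_equal_idEntite := by
  intro mot entite data _dom _pre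
  unfold Spec_idEntite idEntite idEntite_alt pvLastId
  simp only [foldA_split, fold_eq_lastId]
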